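/-
  THE CONTRACTS OF THE SMALL ROUTINES OF libc (c/libc.c; design/CONTRACTS.md entries 91, 26, 36, 10): `memcmp`, `abs`. `Spec`s over the shadow layer only. Ghost parameters of every Spec: `others`, `frames` — the live objects of the
  shadow invariant (also for `abs`, which touches no memory but the slot of its return address: the statements
  are uniform, and a caller hands the layer through).

      function   own frame                                  callees (largest frame)             frame
      memcmp     6 pushes + sub rsp 8 = 56                  __asan_load1_noabort (16)    56 + 8 + 16 = 80
      abs        —                                          —                                          0

  The contracts are those of the shared package (ProgX/Spec/LibcMisc.lean: `memcmp`, `abs`; `malloc` and `free` are the heap's: ProgX/Base/Spec/Heap.lean), stated for any program record `T : ProgX.Text`; the names of this file are their instances at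
  `ProgX.Base.T` (abbreviations).
-/
import ProgX.Base.Spec.Basic
import ProgX.Spec.LibcMisc
namespace ProgX.Base.Spec
open X86 X86.User Asan

/-- **`memcmp(rdi = a, rsi = b, rdx = n)`** (CONTRACTS 91), on the base image: the generic contract
`ProgX.Spec.memcmp.spec` (ProgX/Spec/LibcMisc.lean, where it is described) at the text record `ProgX.Base.T`. -/
abbrev memcmp.spec (others : List Obj) (frames : List (Nat × FrameLayout)) : Spec :=
  ProgX.Spec.memcmp.spec T others frames

/-- **`abs(edi = x)`** (CONTRACTS 26), on the base image: the generic contract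
`ProgX.Spec.abs.spec` (ProgX/Spec/LibcMisc.lean, where it is described) at the text record `ProgX.Base.T`. -/
abbrev abs.spec (others : List Obj) (frames : List (Nat × FrameLayout)) : Spec :=
  ProgX.Spec.abs.spec T others frames

/-! The `vspec` rewrite rules (frame sizes, footprints) are the generic ones. -/
export ProgX.Spec (
  memcmp.spec_frame memcmp.spec_writes abs.spec_frame abs.spec_writes)

end ProgX.Base.Spec
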